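-- pv_equiv track=rewrite | github.com/aceofall/protoc-gen-doc | script/filter.py | getCloseBraceLine
-- ===== SOURCE A (Python) =====
-- def getCloseBraceLine(linenum, syntax_lines):
--     endnum = linenum
--     if syntax_lines[endnum].find('}') != -1:
--         return endnum
--
--     endnum += 1
--     while True:
--         if syntax_lines[endnum].find('{') != -1: # 하위 block
--             endnum = getCloseBraceLine(endnum, syntax_lines) + 1
--             continue
--         if syntax_lines[endnum].find('}') != -1:
--             break
--         endnum += 1
--     return endnum
-- ===== SOURCE B (Python) =====
-- def getCloseBraceLine(linenum, syntax_lines):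
--     if '}' in syntax_lines[linenum]:
--         return linenum
--     depth = 1
--     endnum = linenum + 1
--     while True:
--         line = syntax_lines[endnum]
--         if '{' in line:
--             if '}' not in line:
--                 depth += 1
--         elif '}' in line:
--             depth -= 1
--             if depth == 0:
--                 return endnum
--         endnum += 1
-- ===== Notes on version B (the rewrite author's own statement) =====
-- stated objective: simpler
-- what changed: A finds the matching close brace by recursing into every nested block; B replaces the recursion with a single iterative scan that maintains an integer brace-depth counter (lines containing both '{' and '}' are net-zero, matching A's '{'-first check order).
import Mathlib
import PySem

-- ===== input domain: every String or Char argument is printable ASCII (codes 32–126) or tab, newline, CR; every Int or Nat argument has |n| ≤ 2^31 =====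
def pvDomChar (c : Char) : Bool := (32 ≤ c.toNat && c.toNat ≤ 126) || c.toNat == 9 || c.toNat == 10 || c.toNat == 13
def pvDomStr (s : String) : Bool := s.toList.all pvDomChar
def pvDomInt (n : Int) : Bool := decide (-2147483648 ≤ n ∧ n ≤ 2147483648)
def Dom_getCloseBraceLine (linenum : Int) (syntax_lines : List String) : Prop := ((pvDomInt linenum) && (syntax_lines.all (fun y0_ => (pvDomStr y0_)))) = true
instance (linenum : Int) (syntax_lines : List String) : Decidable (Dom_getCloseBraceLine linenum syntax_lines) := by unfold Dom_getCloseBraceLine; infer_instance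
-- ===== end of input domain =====

-- B replaces A's recursion on nested blocks by a single iterative scan with a brace-depth counter (same cost, simpler control flow).


-- ===== PORT A =====
-- fuel makes the mutual recursion total; under Pre_ it never runs out (proved below)
mutual
def pvGoA (L : List String) : Nat → Int → Option Int
  | 0, _ => none
  | f+1, linenum =>
    match PySem.List.pyGet? L linenum with
    | none => none                                   -- IndexError
    | some line =>
      if PySem.Str.find line "}" ≠ -1 then some linenum
      else pvLoopA L f (linenum + 1)
def pvLoopA (L : List String) : Nat → Int → Option Int
  | 0, _ => none
  | f+1, endnum =>
    match PySem.List.pyGet? L endnum with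
    | none => none                                   -- IndexError
    | some line =>
      if PySem.Str.find line "{" ≠ -1 then
        match pvGoA L f endnum with                  -- recursive call on the sub-block
        | none => none
        | some j => pvLoopA L f (j + 1)
      else if PySem.Str.find line "}" ≠ -1 then some endnum
      else pvLoopA L f (endnum + 1)
end

def getCloseBraceLine (linenum : Int) (syntax_lines : List String) : Int :=
  (pvGoA syntax_lines (4 * syntax_lines.length + 4) linenum).getD 0

-- ===== PORT B =====
-- the while-loop of Source B; fuel only for totality, never exhausted under Pre_
def pvLoopB (L : List String) : Nat → Int → Int → Option Int
  | 0, _, _ => none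
  | f+1, depth, endnum =>
    match PySem.List.pyGet? L endnum with
    | none => none                                   -- IndexError
    | some line =>
      if PySem.Str.isIn "{" line then
        (if PySem.Str.isIn "}" line then pvLoopB L f depth (endnum + 1)
         else pvLoopB L f (depth + 1) (endnum + 1))
      else if PySem.Str.isIn "}" line then
        (if depth - 1 = 0 then some endnum else pvLoopB L f (depth - 1) (endnum + 1))
      else pvLoopB L f depth (endnum + 1)

def pvBodyB (linenum : Int) (L : List String) : Option Int :=
  match PySem.List.pyGet? L linenum with
  | none => none
  | some line =>
    if PySem.Str.isIn "}" line then some linenum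
    else pvLoopB L (2 * L.length + 2) 1 (linenum + 1)

def getCloseBraceLine_alt (linenum : Int) (syntax_lines : List String) : Int :=
  (pvBodyB linenum syntax_lines).getD 0

-- ===== PRECONDITION & SPEC =====
-- net brace weight of a line, with A's '{'-first priority: a line with both braces is 0
def pvDelta (L : List String) (i : Int) : Int :=
  match PySem.List.pyGet? L i with
  | none => 0
  | some line =>
    if PySem.Str.isIn "{" line then (if PySem.Str.isIn "}" line then 0 else 1)
    else if PySem.Str.isIn "}" line then -1 else 0

def pvSumD (L : List String) : Nat → Int → Int
  | 0, _ => 0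
  | k+1, i => pvDelta L i + pvSumD L k (i + 1)

-- sum of pvDelta over the index interval [e, j]
def pvSumDelta (L : List String) (e j : Int) : Int := pvSumD L ((j + 1 - e).toNat) e

-- Pre_ = exactly the inputs where Python A returns (elsewhere A raises IndexError): a valid
-- (possibly negative, Python-style) start index, and either the start line contains '}' or a
-- later in-range index closes the scan (the running depth 1 + Σ pvDelta reaches 0).
def Pre_getCloseBraceLine (linenum : Int) (syntax_lines : List String) : Prop :=
  (-(syntax_lines.length : Int) ≤ linenum ∧ linenum < (syntax_lines.length : Int)) ∧
  (PySem.Str.isIn "}" ((PySem.List.pyGet? syntax_lines linenum).getD "") = true ∨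
   ∃ k ∈ Finset.range (((syntax_lines.length : Int) - (linenum + 1)).toNat),
     1 + pvSumDelta syntax_lines (linenum + 1) (linenum + 1 + (k : Int)) = 0)

instance (linenum : Int) (syntax_lines : List String) : Decidable (Pre_getCloseBraceLine linenum syntax_lines) := by
  unfold Pre_getCloseBraceLine; infer_instance

def pvWitness_getCloseBraceLine : Int × List String := (0, ["msg M {", "  x", "}"])

def Spec_getCloseBraceLine (linenum : Int) (syntax_lines : List String) (out : Int) : Prop := out = getCloseBraceLine_alt linenum syntax_lines
instance (linenum : Int) (syntax_lines : List String) (out : Int) : Decidable (Spec_getCloseBraceLine linenum syntax_lines out) := by unfold Spec_getCloseBraceLine; infer_instance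

-- ===== CLAIM (what is proved, stated in full; the proofs are below) =====
def Claim_equal_getCloseBraceLine : Prop := ∀ (linenum : Int) (syntax_lines : List String), Dom_getCloseBraceLine linenum syntax_lines → Pre_getCloseBraceLine linenum syntax_lines → Spec_getCloseBraceLine linenum syntax_lines (getCloseBraceLine linenum syntax_lines)

-- ===== LEMMAS AND PROOFS =====

lemma pv_get_bounds {L : List String} {e : Int} {line : String}
    (h : PySem.List.pyGet? L e = some line) : -(L.length : Int) ≤ e ∧ e < (L.length : Int) := by
  by_contra hc
  rw [(PySem.List.pyGet?_eq_none_iff L e).2 (fun hr => hc ⟨hr.1, hr.2⟩)] at h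
  cases h

lemma pv_get_some {L : List String} {e : Int}
    (h1 : -(L.length : Int) ≤ e) (h2 : e < (L.length : Int)) :
    ∃ line, PySem.List.pyGet? L e = some line := by
  cases h : PySem.List.pyGet? L e with
  | some l => exact ⟨l, rfl⟩
  | none => rw [PySem.List.pyGet?_eq_none_iff] at h; exact absurd ⟨h1, h2⟩ h


-- the clean depth-counting spec (well-founded, no fuel); both ports are reduced to it
def pvFC (L : List String) (depth e : Int) : Option Int :=
  match h : PySem.List.pyGet? L e with
  | none => none
  | some line =>
    if PySem.Chars.isIn ['{'] line.toList = true then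
      (if PySem.Chars.isIn ['}'] line.toList = true then pvFC L depth (e + 1)
       else pvFC L (depth + 1) (e + 1))
    else if PySem.Chars.isIn ['}'] line.toList = true then
      (if depth - 1 = 0 then some e else pvFC L (depth - 1) (e + 1))
    else pvFC L depth (e + 1)
termination_by ((L.length : Int) - e).toNat
decreasing_by all_goals (have := (pv_get_bounds h).2; omega)

-- what A's top level computes, in spec terms
def pvTopSpec (L : List String) (e : Int) : Option Int :=
  match PySem.List.pyGet? L e with
  | none => none
  | some line => if PySem.Chars.isIn ['}'] line.toList = true then some e else pvFC L 1 (e + 1)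

lemma pv_findO (line : String) :
    (PySem.Str.find line "{" ≠ -1) ↔ (PySem.Chars.isIn ['{'] line.toList = true) := by
  simp [PySem.Chars.isIn_iff_infix, PySem.Chars.find_eq_neg_one_iff]

lemma pv_findC (line : String) :
    (PySem.Str.find line "}" ≠ -1) ↔ (PySem.Chars.isIn ['}'] line.toList = true) := by
  simp [PySem.Chars.isIn_iff_infix, PySem.Chars.find_eq_neg_one_iff]

lemma pvFC_none {L : List String} {e : Int} (d : Int)
    (hg : PySem.List.pyGet? L e = none) : pvFC L d e = none := by
  rw [pvFC, hg]

lemma pvFC_some {L : List String} {e : Int} {line : String} (d : Int)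
    (hg : PySem.List.pyGet? L e = some line) :
    pvFC L d e =
      (if PySem.Chars.isIn ['{'] line.toList = true then
        (if PySem.Chars.isIn ['}'] line.toList = true then pvFC L d (e + 1)
         else pvFC L (d + 1) (e + 1))
       else if PySem.Chars.isIn ['}'] line.toList = true then
        (if d - 1 = 0 then some e else pvFC L (d - 1) (e + 1))
       else pvFC L d (e + 1)) := by
  rw [pvFC, hg]

lemma pvSumDelta_cons (L : List String) (e j : Int) (h : e ≤ j) :
    pvSumDelta L e j = pvDelta L e + pvSumDelta L (e + 1) j := by
  unfold pvSumDelta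
  rw [show (j + 1 - e).toNat = (j + 1 - (e + 1)).toNat + 1 by omega]
  rfl

lemma pvSumDelta_empty (L : List String) (e j : Int) (h : j < e) : pvSumDelta L e j = 0 := by
  unfold pvSumDelta
  rw [show (j + 1 - e).toNat = 0 by omega]
  rfl

-- bounds of the result of the depth scan
lemma pvFC_bounds (L : List String) : ∀ (k : Nat) (d e j : Int),
    ((L.length : Int) - e).toNat = k → pvFC L d e = some j →
    e ≤ j ∧ j < (L.length : Int) := by
  intro k
  induction k using Nat.strong_induction_on with
  | _ k ih =>
    intro d e j hk h
    cases hg : PySem.List.pyGet? L e with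
    | none => rw [pvFC_none d hg] at h; cases h
    | some line =>
      rw [pvFC_some d hg] at h
      have hb := pv_get_bounds hg
      have hrec : ∀ d', pvFC L d' (e + 1) = some j → e ≤ j ∧ j < (L.length : Int) := by
        intro d' h'
        have := ih (((L.length : Int) - (e + 1)).toNat) (by omega) d' (e + 1) j rfl h'
        exact ⟨by omega, this.2⟩
      split_ifs at h with ho hc hc hd
      · exact hrec _ h
      · exact hrec _ h
      · cases h; exact ⟨le_refl _, hb.2⟩
      · exact hrec _ h
      · exact hrec _ h

-- decomposition: scanning at depth d+1 = close the innermost block, then continue at depth d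
lemma pv_comp (L : List String) : ∀ (k : Nat) (d e : Int),
    ((L.length : Int) - e).toNat = k → 1 ≤ d →
    pvFC L (d + 1) e = (pvFC L d e).bind (fun j => pvFC L 1 (j + 1)) := by
  intro k
  induction k using Nat.strong_induction_on with
  | _ k ih =>
    intro d e hk hd
    cases hg : PySem.List.pyGet? L e with
    | none => rw [pvFC_none (d + 1) hg, pvFC_none d hg]; rfl
    | some line =>
      have hb := pv_get_bounds hg
      have hih : ∀ d', 1 ≤ d' → pvFC L (d' + 1) (e + 1) =
          (pvFC L d' (e + 1)).bind (fun j => pvFC L 1 (j + 1)) :=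
        fun d' hd' => ih (((L.length : Int) - (e + 1)).toNat) (by omega) d' (e + 1) rfl hd'
      rw [pvFC_some (d + 1) hg, pvFC_some d hg]
      cases ho : PySem.Chars.isIn ['{'] line.toList with
      | true =>
        cases hc : PySem.Chars.isIn ['}'] line.toList with
        | true => simp [ho, hc, hih d hd]
        | false =>
          simp only [Bool.false_eq_true, if_true, if_false]
          rw [hih (d + 1) (by omega), hih d hd]
      | false =>
        cases hc : PySem.Chars.isIn ['}'] line.toList with
        | true =>
          by_cases h1 : d = 1
          · subst h1; simp [ho, hc]
          · simp only [ho, hc, Bool.false_eq_true, if_false, if_true]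
            rw [if_neg (by omega : ¬ d + 1 - 1 = 0), if_neg (by omega : ¬ d - 1 = 0)]
            rw [show d + 1 - 1 = (d - 1) + 1 by ring, hih (d - 1) (by omega)]
        | false => simp [ho, hc, hih d hd]

-- a witness index where the running depth reaches 0 guarantees the scan returns
lemma pv_succ (L : List String) : ∀ (k : Nat) (d e j : Int),
    ((L.length : Int) - e).toNat = k →
    -(L.length : Int) ≤ e → 1 ≤ d → e ≤ j → j < (L.length : Int) →
    d + pvSumDelta L e j = 0 →
    ∃ j', pvFC L d e = some j' := by
  intro k
  induction k using Nat.strong_induction_on with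
  | _ k ih =>
    intro d e j hk he hd hej hjn hs
    obtain ⟨line, hg⟩ := pv_get_some he (by omega)
    have hb := pv_get_bounds hg
    have hδ : pvDelta L e =
        (if PySem.Chars.isIn ['{'] line.toList = true then
          (if PySem.Chars.isIn ['}'] line.toList = true then 0 else 1)
         else if PySem.Chars.isIn ['}'] line.toList = true then -1 else 0) := by
      rw [pvDelta, hg]
      simp only [PySem.Str.isIn_eq, show "{".toList = ['{'] from rfl,
        show "}".toList = ['}'] from rfl]
    rw [pvSumDelta_cons L e j hej] at hs
    have hih : ∀ d', 1 ≤ d' → d' + pvSumDelta L (e + 1) j = 0 → e + 1 ≤ j →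
        ∃ j', pvFC L d' (e + 1) = some j' := by
      intro d' hd' hs' hej'
      exact ih (((L.length : Int) - (e + 1)).toNat) (by omega) d' (e + 1) j rfl
        (by omega) hd' hej' hjn hs'
    rw [pvFC_some d hg]
    cases ho : PySem.Chars.isIn ['{'] line.toList with
    | true =>
      cases hc : PySem.Chars.isIn ['}'] line.toList with
      | true =>
        rw [ho, hc] at hδ; simp at hδ
        have hej' : e + 1 ≤ j := by
          rcases lt_or_eq_of_le hej with h | h
          · omega
          · subst h; rw [pvSumDelta_empty L (e + 1) e (by omega), hδ] at hs; omega
        obtain ⟨j', hj'⟩ := hih d hd (by omega) hej'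
        exact ⟨j', by simp [ho, hc, hj']⟩
      | false =>
        rw [ho, hc] at hδ; simp at hδ
        have hej' : e + 1 ≤ j := by
          rcases lt_or_eq_of_le hej with h | h
          · omega
          · subst h; rw [pvSumDelta_empty L (e + 1) e (by omega), hδ] at hs; omega
        obtain ⟨j', hj'⟩ := hih (d + 1) (by omega) (by omega) hej'
        exact ⟨j', by simp [ho, hc, hj']⟩
    | false =>
      cases hc : PySem.Chars.isIn ['}'] line.toList with
      | true =>
        rw [ho, hc] at hδ; simp at hδ
        by_cases h1 : d = 1
        · subst h1; exact ⟨e, by simp [ho, hc]⟩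
        · have hej' : e + 1 ≤ j := by
            rcases lt_or_eq_of_le hej with h | h
            · omega
            · subst h; rw [pvSumDelta_empty L (e + 1) e (by omega), hδ] at hs; omega
          obtain ⟨j', hj'⟩ := hih (d - 1) (by omega) (by omega) hej'
          refine ⟨j', ?_⟩
          simp only [ho, hc, Bool.false_eq_true, if_false, if_true]
          rw [if_neg (by omega : ¬ d - 1 = 0)]
          exact hj'
      | false =>
        rw [ho, hc] at hδ; simp at hδ
        have hej' : e + 1 ≤ j := by
          rcases lt_or_eq_of_le hej with h | h
          · omega
          · subst h; rw [pvSumDelta_empty L (e + 1) e (by omega), hδ] at hs; omega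
        obtain ⟨j', hj'⟩ := hih d hd (by omega) hej'
        exact ⟨j', by simp [ho, hc, hj']⟩

-- B's fuelled loop agrees with the spec scan whenever the fuel dominates the remaining distance
lemma pvB_eq (L : List String) : ∀ (f : Nat) (d e : Int),
    ((L.length : Int) - e).toNat < f → pvLoopB L f d e = pvFC L d e := by
  intro f
  induction f with
  | zero => intro d e hf; omega
  | succ f ihf =>
    intro d e hf
    cases hg : PySem.List.pyGet? L e with
    | none => rw [pvFC_none d hg]; simp [pvLoopB, hg]
    | some line =>
      have hb := pv_get_bounds hg
      have hrec : ∀ d', pvLoopB L f d' (e + 1) = pvFC L d' (e + 1) :=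
        fun d' => ihf d' (e + 1) (by omega)
      rw [pvFC_some d hg]
      simp only [pvLoopB, hg]
      cases ho : PySem.Chars.isIn ['{'] line.toList with
      | true =>
        cases hc : PySem.Chars.isIn ['}'] line.toList <;>
          simp [PySem.Str.isIn_eq, ho, hc, hrec]
      | false =>
        cases hc : PySem.Chars.isIn ['}'] line.toList with
        | true =>
          by_cases h1 : d - 1 = 0 <;>
            simp [PySem.Str.isIn_eq, ho, hc, h1, hrec]
        | false => simp [PySem.Str.isIn_eq, ho, hc, hrec]

-- fuel adequacy for A's port: if the spec scan succeeds, A's recursion has enough fuel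
lemma pvA_adequate (L : List String) : ∀ (f : Nat),
    (∀ e j, pvTopSpec L e = some j → 2 * ((L.length : Int) - e).toNat ≤ f + 1 →
      pvGoA L f e = some j) ∧
    (∀ e j, pvFC L 1 e = some j → 2 * ((L.length : Int) - e).toNat ≤ f →
      pvLoopA L f e = some j) := by
  intro f
  induction f with
  | zero =>
    constructor
    · intro e j h hb
      unfold pvTopSpec at h
      cases hg : PySem.List.pyGet? L e with
      | none => rw [hg] at h; cases h
      | some line => have := (pv_get_bounds hg).2; omega
    · intro e j h hb
      have := (pvFC_bounds L (((L.length : Int) - e).toNat) 1 e j rfl h)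
      omega
  | succ f ihf =>
    constructor
    · -- go part
      intro e j h hb
      unfold pvTopSpec at h
      cases hg : PySem.List.pyGet? L e with
      | none => rw [hg] at h; cases h
      | some line =>
        rw [hg] at h
        have hbnd := pv_get_bounds hg
        simp only [PySem.Str.isIn_eq] at h
        cases hc : PySem.Chars.isIn ['}'] line.toList with
        | true =>
          rw [hc] at h; simp at h; subst h
          have hinf := (PySem.Chars.isIn_iff_infix _ _).1 hc
          simp [pvGoA, hg, PySem.Chars.find_eq_neg_one_iff, hinf]
        | false =>
          rw [hc] at h; simp at h
          have := ihf.2 (e + 1) j h (by omega)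
          simp only [pvGoA, hg]
          rw [if_neg (fun hf' => by rw [(pv_findC line).1 hf'] at hc; cases hc)]
          exact this
    · -- loop part
      intro e j h hb
      have hbnds := pvFC_bounds L (((L.length : Int) - e).toNat) 1 e j rfl h
      cases hg : PySem.List.pyGet? L e with
      | none => rw [pvFC_none 1 hg] at h; cases h
      | some line =>
        rw [pvFC_some 1 hg] at h
        have hbnd := pv_get_bounds hg
        simp only [pvLoopA, hg]
        cases ho : PySem.Chars.isIn ['{'] line.toList with
        | true =>
          rw [if_pos ((pv_findO line).2 ho)]
          cases hc : PySem.Chars.isIn ['}'] line.toList with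
          | true =>
            rw [ho, hc] at h; simp at h
            -- the inner recursive call returns e itself (the line also contains '}')
            have hgo : pvGoA L f e = some e := by
              have hinf := (PySem.Chars.isIn_iff_infix _ _).1 hc
              cases f with
              | zero => omega
              | succ f' => simp [pvGoA, hg, PySem.Chars.find_eq_neg_one_iff, hinf]
            rw [hgo]
            exact ihf.2 (e + 1) j h (by omega)
          | false =>
            rw [ho, hc] at h; simp at h
            rw [show (2:Int) = 1 + 1 by norm_num] at h
            rw [pv_comp L (((L.length : Int) - (e + 1)).toNat) 1 (e + 1) rfl (by omega)] at h
            cases h1 : pvFC L 1 (e + 1) with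
            | none => rw [h1] at h; cases h
            | some j1 =>
              rw [h1] at h; simp at h
              have hj1 := pvFC_bounds L (((L.length : Int) - (e + 1)).toNat) 1 (e + 1) j1 rfl h1
              have hgo : pvGoA L f e = some j1 := by
                apply ihf.1 e j1 _ (by omega)
                unfold pvTopSpec
                rw [hg]
                simp only [PySem.Str.isIn_eq, hc, Bool.false_eq_true, if_false]
                exact h1
              rw [hgo]
              exact ihf.2 (j1 + 1) j h (by omega)
        | false =>
          rw [if_neg (fun hf' => by rw [(pv_findO line).1 hf'] at ho; cases ho)]
          cases hc : PySem.Chars.isIn ['}'] line.toList with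
          | true =>
            rw [ho, hc] at h; simp at h; subst h
            rw [if_pos ((pv_findC line).2 hc)]
          | false =>
            rw [ho, hc] at h; simp at h
            rw [if_neg (fun hf' => by rw [(pv_findC line).1 hf'] at hc; cases hc)]
            exact ihf.2 (e + 1) j h (by omega)

-- ===== VERDICT (by name: the statement is the Claim_ definition above) =====
theorem getCloseBraceLine_spec : Claim_equal_getCloseBraceLine := by
  intro l L _ hpre
  obtain ⟨⟨h1, h2⟩, hrest⟩ := hpre
  obtain ⟨line, hg⟩ := pv_get_some h1 h2
  unfold Spec_getCloseBraceLine getCloseBraceLine getCloseBraceLine_alt pvBodyB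
  rw [hg]
  rw [hg] at hrest
  simp only [Option.getD_some, PySem.Str.isIn_eq,
    show "}".toList = ['}'] from rfl] at hrest ⊢
  cases hc : PySem.Chars.isIn ['}'] line.toList with
  | true =>
    rw [if_pos rfl]
    have hgo : pvGoA L (4 * L.length + 4) l = some l := by
      have hinf := (PySem.Chars.isIn_iff_infix _ _).1 hc
      rw [show 4 * L.length + 4 = (4 * L.length + 3) + 1 by omega]
      simp [pvGoA, hg, PySem.Chars.find_eq_neg_one_iff, hinf]
    rw [hgo]
  | false =>
    rw [hc] at hrest
    rcases hrest with hrest | ⟨k, hk, hsum⟩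
    · cases hrest
    · simp only [Finset.mem_range] at hk
      obtain ⟨j', hj'⟩ := pv_succ L (((L.length : Int) - (l + 1)).toNat) 1 (l + 1)
        (l + 1 + (k : Int)) rfl (by omega) (by omega) (by omega) (by omega) hsum
      have hbeq : pvLoopB L (2 * L.length + 2) 1 (l + 1) = some j' := by
        rw [pvB_eq L (2 * L.length + 2) 1 (l + 1) (by omega)]
        exact hj'
      have hgo : pvGoA L (4 * L.length + 4) l = some j' := by
        apply (pvA_adequate L (4 * L.length + 4)).1 l j' _ (by omega)
        unfold pvTopSpec
        rw [hg]
        simp only [PySem.Str.isIn_eq, hc, Bool.false_eq_true, if_false]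
        exact hj'
      rw [if_neg (by simp), hgo, hbeq]
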